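-- pv_equiv track=rewrite | github.com/sumedChalakh/Resume-Optimizer | app.py | score_keyword_matches
-- ===== SOURCE A (Python) =====
-- def score_keyword_matches(text, keywords):
--   if not text or not keywords:
--     return 0
--
--   lowered = text.lower()
--   score = 0
--   for keyword in keywords:
--     if not keyword:
--       continue
--     if keyword in lowered:
--       score += 3 if " " in keyword else 1
--   return score
-- ===== SOURCE B (Python) =====
-- def score_keyword_matches(text, keywords):
--     lowered = text.lower()
--     lengths = {len(k) for k in keywords if k}
--     subs = set()
--     for L in lengths:
--         for i in range(len(lowered) - L + 1):
--             subs.add(lowered[i:i + L])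
--     return sum((3 if " " in k else 1) for k in keywords if k and k in subs)
-- ===== Notes on version B (the rewrite author's own statement) =====
-- stated objective: faster
-- what changed: B does no substring searching: it collects, in one pass per distinct keyword length, every window of the lowered text of those lengths into a hash set, then scores each keyword by a single set-membership lookup, instead of A's whole-text substring search per keyword.
import Mathlib
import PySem

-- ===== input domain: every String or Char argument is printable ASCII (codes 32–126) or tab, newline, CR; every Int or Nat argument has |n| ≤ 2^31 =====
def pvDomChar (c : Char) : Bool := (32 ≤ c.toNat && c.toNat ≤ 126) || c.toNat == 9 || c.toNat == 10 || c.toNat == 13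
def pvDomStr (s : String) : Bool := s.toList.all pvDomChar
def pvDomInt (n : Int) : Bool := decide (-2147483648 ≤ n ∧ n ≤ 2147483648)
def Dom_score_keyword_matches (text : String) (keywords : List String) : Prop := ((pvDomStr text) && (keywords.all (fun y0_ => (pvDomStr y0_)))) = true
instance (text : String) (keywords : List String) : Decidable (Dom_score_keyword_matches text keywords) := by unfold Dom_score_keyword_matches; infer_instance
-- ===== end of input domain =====

-- B does no substring search at all: one scan of the lowered text collects every window whose
-- length is an occurring keyword length into a set, then each keyword is scored by set membership.

-- ===== PORT A =====
def score_keyword_matches (text : String) (keywords : List String) : Int :=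
  if text = "" ∨ keywords = [] then 0
  else
    let lowered := PySem.Str.lower text
    keywords.foldl (fun score keyword =>
      if keyword = "" then score
      else if PySem.Str.isIn keyword lowered then
        score + (if PySem.Str.isIn " " keyword then 3 else 1)
      else score) 0

-- ===== PORT B =====
-- lengths = {len(k) for k in keywords if k}
def pvLengths (keywords : List String) : PySem.Set Int :=
  PySem.Set.ofList (keywords.filterMap (fun k =>
    if k = "" then none else some ((k.toList.length : Int))))

-- subs = set of all windows lowered[i:i+L] for L in lengths; the slice lowered[i:i+L] is
-- drop i.toNat / take L.toNat, exact here since i (from range(…)) and L (a length) are ≥ 0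
def pvSubs (lowered : List Char) (keywords : List String) : PySem.Set (List Char) :=
  (pvLengths keywords).foldl (fun s L =>
    (PySem.List.pyRange 0 ((lowered.length : Int) - L + 1)).foldl
      (fun s i => PySem.Set.add s ((lowered.drop i.toNat).take L.toNat)) s)
    PySem.Set.empty

def score_keyword_matches_alt (text : String) (keywords : List String) : Int :=
  let lowered := PySem.Str.lower text
  let subs := pvSubs lowered.toList keywords
  keywords.foldl (fun score k =>
    if k = "" then score
    else if PySem.Set.contains subs k.toList then
      score + (if PySem.Str.isIn " " k then 3 else 1)
    else score) 0

-- ===== PRECONDITION & SPEC =====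
def Spec_score_keyword_matches (text : String) (keywords : List String) (out : Int) : Prop := out = score_keyword_matches_alt text keywords
instance (text : String) (keywords : List String) (out : Int) : Decidable (Spec_score_keyword_matches text keywords out) := by unfold Spec_score_keyword_matches; infer_instance

-- ===== CLAIM (what is proved, stated in full; the proofs are below) =====
def Claim_equal_score_keyword_matches : Prop := ∀ (text : String) (keywords : List String), Dom_score_keyword_matches text keywords → Spec_score_keyword_matches text keywords (score_keyword_matches text keywords)

-- ===== LEMMAS AND PROOFS =====

-- per-keyword weight, relative to the lowered text (A's contribution of one keyword)
def pvW (lowered : String) (k : String) : Int :=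
  if k = "" then 0
  else if PySem.Str.isIn k lowered then (if PySem.Str.isIn " " k then 3 else 1) else 0

theorem foldlA (lowered : String) (xs : List String) (a : Int) :
    xs.foldl (fun score keyword =>
      if keyword = "" then score
      else if PySem.Str.isIn keyword lowered then
        score + (if PySem.Str.isIn " " keyword then 3 else 1)
      else score) a = a + ((xs.map (pvW lowered)).sum) := by
  induction xs generalizing a with
  | nil => simp
  | cons x xs ih =>
    simp only [List.foldl_cons, List.map_cons, List.sum_cons, ih, pvW]
    split_ifs <;> ring

theorem mem_windows_foldl (Ls : List Int) (lowered : List Char)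
    (s₀ : PySem.Set (List Char)) (y : List Char) :
    y ∈ Ls.foldl (fun s L =>
        (PySem.List.pyRange 0 ((lowered.length : Int) - L + 1)).foldl
          (fun s i => PySem.Set.add s ((lowered.drop i.toNat).take L.toNat)) s) s₀ ↔
      y ∈ s₀ ∨ ∃ L ∈ Ls,
        ∃ i ∈ PySem.List.pyRange 0 ((lowered.length : Int) - L + 1),
          y = (lowered.drop i.toNat).take L.toNat := by
  induction Ls generalizing s₀ with
  | nil => simp
  | cons L Ls ih =>
    rw [List.foldl_cons, ih, PySem.Set.mem_foldl_add]
    constructor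
    · rintro (⟨h | ⟨i, hi, rfl⟩⟩ | ⟨L', hL', i, hi, rfl⟩)
      · exact Or.inl h
      · exact Or.inr ⟨L, List.mem_cons_self, i, hi, rfl⟩
      · exact Or.inr ⟨L', List.mem_cons_of_mem _ hL', i, hi, rfl⟩
    · rintro (h | ⟨L', hL', i, hi, rfl⟩)
      · exact Or.inl (Or.inl h)
      · rcases List.mem_cons.mp hL' with rfl | h
        · exact Or.inl (Or.inr ⟨i, hi, rfl⟩)
        · exact Or.inr ⟨L', h, i, hi, rfl⟩

theorem mem_pvSubs (lowered : List Char) (keywords : List String) (y : List Char) :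
    y ∈ pvSubs lowered keywords ↔
      ∃ L ∈ pvLengths keywords,
        ∃ i ∈ PySem.List.pyRange 0 ((lowered.length : Int) - L + 1),
          y = (lowered.drop i.toNat).take L.toNat := by
  unfold pvSubs
  rw [mem_windows_foldl]
  simp [PySem.Set.empty]

-- every collected window is a genuine infix of the lowered text
theorem window_infix (lowered : List Char) (n m : Nat) :
    (lowered.drop n).take m <:+: lowered :=
  ((lowered.drop n).take_prefix m).isInfix.trans (lowered.drop_suffix n).isInfix

-- conversely, an infix whose length occurs among the keyword lengths was collected
theorem infix_mem_pvSubs (lowered : List Char) (keywords : List String) (k : String)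
    (hk : k ∈ keywords) (hne : k ≠ "") (hinf : k.toList <:+: lowered) :
    k.toList ∈ pvSubs lowered keywords := by
  rcases hinf with ⟨s, t, hst⟩
  rw [mem_pvSubs]
  refine ⟨(k.toList.length : Int), ?_, (s.length : Int), ?_, ?_⟩
  · unfold pvLengths
    rw [PySem.Set.mem_ofList, List.mem_filterMap]
    exact ⟨k, hk, by rw [if_neg hne]⟩
  · rw [PySem.List.mem_pyRange_one]
    have hlen : lowered.length = s.length + k.toList.length + t.length := by
      rw [← hst, List.length_append, List.length_append]
    omega
  · rw [Int.toNat_natCast, Int.toNat_natCast, ← hst,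
      show s ++ k.toList ++ t = s ++ (k.toList ++ t) from by rw [List.append_assoc],
      List.drop_left, List.take_left]

-- membership in the window set decides exactly A's substring test, for a listed keyword
theorem contains_pvSubs_iff (lowered : String) (keywords : List String) (k : String)
    (hk : k ∈ keywords) (hne : k ≠ "") :
    PySem.Set.contains (pvSubs lowered.toList keywords) k.toList = PySem.Str.isIn k lowered := by
  by_cases h : PySem.Str.isIn k lowered = true
  · rw [h, PySem.Set.contains_iff]
    exact infix_mem_pvSubs _ _ _ hk hne
      ((PySem.Chars.isIn_iff_infix _ _).mp (by rw [← PySem.Str.isIn_eq]; exact h))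
  · have hni : ¬ k.toList <:+: lowered.toList := by
      rw [← PySem.Chars.isIn_iff_infix, ← PySem.Str.isIn_eq]
      simpa using h
    rw [eq_false_of_ne_true h, ← Bool.not_eq_true, PySem.Set.contains_iff]
    intro hm
    rcases (mem_pvSubs _ _ _).mp hm with ⟨L, _, i, _, hw⟩
    exact hni (hw ▸ window_infix lowered.toList i.toNat L.toNat)

-- B's scoring fold, over any sublist of the keywords, sums A's per-keyword weights
theorem foldlB (lowered : String) (keywords : List String) (xs : List String) (a : Int)
    (hsub : ∀ k ∈ xs, k ∈ keywords) :
    xs.foldl (fun score k =>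
      if k = "" then score
      else if PySem.Set.contains (pvSubs lowered.toList keywords) k.toList then
        score + (if PySem.Str.isIn " " k then 3 else 1)
      else score) a = a + ((xs.map (pvW lowered)).sum) := by
  induction xs generalizing a with
  | nil => simp
  | cons x xs ih =>
    have hx : x ∈ keywords := hsub x List.mem_cons_self
    rw [List.foldl_cons, List.map_cons, List.sum_cons,
      ih _ (fun k hk => hsub k (List.mem_cons_of_mem _ hk))]
    by_cases hne : x = ""
    · rw [if_pos hne, pvW, if_pos hne]; ring
    · rw [if_neg hne, pvW, if_neg hne, contains_pvSubs_iff lowered keywords x hx hne]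
      split_ifs <;> ring

theorem toList_nil_imp (k : String) (h : k.toList = []) : k = "" := by
  rw [← String.ofList_toList (s := k), h]

theorem mapW_empty (keywords : List String) :
    ((keywords.map (pvW (PySem.Str.lower ""))).sum) = 0 := by
  apply List.sum_eq_zero
  intro x hx
  rcases List.mem_map.mp hx with ⟨k, _, hk⟩
  rw [← hk]
  have hl : PySem.Str.lower "" = "" := by decide
  rw [hl, pvW]
  by_cases h : k = ""
  · simp [h]
  · rw [if_neg h]
    have : PySem.Str.isIn k "" = false := by
      rw [PySem.Str.isIn_eq]
      rw [PySem.Chars.isIn_eq_false_iff]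
      intro hi
      exact h (toList_nil_imp k (by simpa [List.infix_nil] using hi))
    rw [this]
    simp

-- ===== VERDICT (by name: the statement is the Claim_ definition above) =====
theorem score_keyword_matches_spec : Claim_equal_score_keyword_matches := by
  intro text keywords _
  unfold Spec_score_keyword_matches score_keyword_matches score_keyword_matches_alt
  dsimp only
  rw [foldlB (PySem.Str.lower text) keywords keywords 0 (fun _ hk => hk), zero_add]
  by_cases ht : text = ""
  · rw [ht]
    simp [mapW_empty]
  · by_cases hk : keywords = []
    · simp [hk]
    · rw [if_neg (by simp [ht, hk]), foldlA, zero_add]
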